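-- pv_equiv track=rewrite | github.com/fishsauce-05/PythonInPTIT | PY01055.py | solve
-- ===== SOURCE A (Python) =====
-- def solve(nums):
-- 	n = len(nums)
-- 	for i in range(0, n, 2):
-- 		if i + 2 >= n:
-- 			break
-- 		if nums[i] != nums[i+2]:
-- 			return 'NO'
-- 	return 'YES' if n%2 == 1 and nums[0] != nums[1] else 'NO'
-- ===== SOURCE B (Python) =====
-- def solve(nums):
--     if not nums:
--         return 'NO'
--     first, second = nums[0], nums[1]
--     it = iter(nums)
--     for x in it:
--         if x != first:
--             return 'NO'
--         if next(it, None) is None: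
--             # list exhausted on the skipped slot: odd length, last even element already checked
--             return 'YES' if second != first else 'NO'
--     return 'NO'
-- ===== Notes on version B (the rewrite author's own statement) =====
-- stated objective: alternative
-- what changed: A's even-stride index loop followed by a separate final parity/first-pair expression is replaced by a single pass over a pair-consuming iterator that computes the verdict inline: each taken element is compared to nums[0], the partner slot is skipped, and exhaustion on the skipped slot (odd length) yields the YES/NO answer directly.
import Mathlib
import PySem

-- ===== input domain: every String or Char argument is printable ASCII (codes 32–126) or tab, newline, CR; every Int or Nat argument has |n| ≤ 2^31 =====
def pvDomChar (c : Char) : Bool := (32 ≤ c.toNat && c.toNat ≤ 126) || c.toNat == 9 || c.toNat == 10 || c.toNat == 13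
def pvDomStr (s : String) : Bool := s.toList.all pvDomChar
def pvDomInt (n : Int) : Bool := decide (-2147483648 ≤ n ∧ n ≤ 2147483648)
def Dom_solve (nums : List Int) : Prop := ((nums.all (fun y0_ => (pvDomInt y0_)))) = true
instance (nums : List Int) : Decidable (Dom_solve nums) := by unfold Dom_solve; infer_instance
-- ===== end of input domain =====

-- B replaces A's even-stride index loop + separate final parity/first-pair expression by one
-- pass over a pair-consuming iterator that computes the verdict inline (objective: alternative).

-- ===== PORT A =====
def solveLoopA (nums : List Int) (n : Int) : List Int → Option String
  | [] => none
  | i :: rest =>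
    if i + 2 ≥ n then none
    else if PySem.List.pyGetD nums i 0 ≠ PySem.List.pyGetD nums (i + 2) 0 then some "NO"
    else solveLoopA nums n rest

def solve (nums : List Int) : String :=
  let n : Int := (nums.length : Int)
  match solveLoopA nums n (PySem.List.pyRange 0 n 2) with
  | some s => s
  | none =>
    if PySem.Int.mod n 2 == 1 && !(PySem.List.pyGetD nums 0 0 == PySem.List.pyGetD nums 1 0)
    then "YES" else "NO"

-- ===== PORT B =====
-- the 'for x in it' loop of Source B: take one element, compare with first, then skip one (next(it, None));
-- exhaustion on the skipped slot returns the inline YES/NO verdict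
def goB (first second : Int) : List Int → String
  | [] => "NO"
  | [x] =>
    if !(x == first) then "NO"
    else if !(second == first) then "YES" else "NO"
  | x :: _ :: rest' =>
    if !(x == first) then "NO" else goB first second rest'

def solve_alt (nums : List Int) : String :=
  match nums with
  | [] => "NO"
  | _ :: _ =>
    let first := PySem.List.pyGetD nums 0 0
    let second := PySem.List.pyGetD nums 1 0
    goB first second nums

-- ===== PRECONDITION & SPEC =====
-- Pre_ excludes exactly the singleton lists: there both A and B raise IndexError on nums[1].
def Pre_solve (nums : List Int) : Prop := nums.length ≠ 1
instance (nums : List Int) : Decidable (Pre_solve nums) := by unfold Pre_solve; infer_instance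
def pvWitness_solve : List Int := ([1, 2, 1])

def Spec_solve (nums : List Int) (out : String) : Prop := out = solve_alt nums
instance (nums : List Int) (out : String) : Decidable (Spec_solve nums out) := by unfold Spec_solve; infer_instance

-- ===== CLAIM (what is proved, stated in full; the proofs are below) =====
def Claim_equal_solve : Prop := ∀ (nums : List Int), Dom_solve nums → Pre_solve nums → Spec_solve nums (solve nums)

-- ===== LEMMAS AND PROOFS =====

-- the loop can only ever return the string "NO"
theorem solveLoopA_eq_some {nums : List Int} {n : Int} :
    ∀ {l : List Int} {s : String}, solveLoopA nums n l = some s → s = "NO" := by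
  intro l
  induction l with
  | nil => intro s h; simp [solveLoopA] at h
  | cons i rest ih =>
    intro s h
    simp only [solveLoopA] at h
    split_ifs at h with h1 h2
    · exact (Option.some.inj h).symm
    · exact ih h

-- on a ≤-sorted index list the early break loses nothing: loop = none iff every checked pair agrees
theorem solveLoopA_none_iff {nums : List Int} {n : Int} :
    ∀ {l : List Int}, l.Pairwise (· ≤ ·) →
      (solveLoopA nums n l = none ↔
        ∀ i ∈ l, i + 2 < n → PySem.List.pyGetD nums i 0 = PySem.List.pyGetD nums (i + 2) 0) := by
  intro l
  induction l with
  | nil => intro _; simp [solveLoopA]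
  | cons i rest ih =>
    intro hp
    have hmono : ∀ j ∈ rest, i ≤ j := fun j hj => (List.pairwise_cons.mp hp).1 j hj
    have hrest := ih (List.pairwise_cons.mp hp).2
    simp only [solveLoopA]
    split_ifs with h1 h2
    · constructor
      · intro _ j hj hlt
        rcases List.mem_cons.mp hj with rfl | hjr
        · omega
        · exact absurd hlt (by have := hmono j hjr; omega)
      · intro _; rfl
    · constructor
      · intro h; exact absurd h (by simp)
      · intro h; exact absurd (h i (List.mem_cons_self) (by omega)) h2
    · rw [hrest]
      constructor
      · intro h j hj hlt
        rcases List.mem_cons.mp hj with rfl | hjr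
        · exact not_ne_iff.mp h2
        · exact h j hjr hlt
      · intro h j hj hlt; exact h j (List.mem_cons_of_mem _ hj) hlt

-- range(0, n, 2) is the even indices below n
theorem pyRange_two_eq (len : Nat) :
    PySem.List.pyRange 0 (len : Int) 2 =
      (List.range ((len + 1) / 2)).map (fun k => ((2 * k : Nat) : Int)) := by
  rw [PySem.List.pyRange_of_pos 0 (len : Int) (by omega)]
  have hc : (if (0 : Int) < (len : Int) then (((len : Int) - 0 + 2 - 1) / 2).toNat else 0)
      = (len + 1) / 2 := by
    split_ifs with h <;> omega
  rw [hc]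
  apply List.map_congr_left
  intro a _
  omega

-- chained equality iff all equal to the first
theorem chain_iff_all_first (f : Nat → Int) (c : Nat) :
    (∀ k, k + 1 < c → f k = f (k + 1)) ↔ (∀ k < c, f k = f 0) := by
  constructor
  · intro h k
    induction k with
    | zero => intro _; rfl
    | succ m ih => intro hm; rw [← h m (by omega)]; exact ih (by omega)
  · intro h k hk
    rw [h k (by omega), h (k + 1) hk]

-- the bridge on A's side: loop verdict = every even index holds nums[0]
theorem loop_none_iff_evenAll (nums : List Int) :
    (solveLoopA nums (nums.length : Int) (PySem.List.pyRange 0 (nums.length : Int) 2) = none) ↔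
      (∀ k, 2 * k < nums.length → nums.getD (2 * k) 0 = nums.getD 0 0) := by
  have hpw : ((List.range ((nums.length + 1) / 2)).map (fun k => ((2 * k : Nat) : Int))).Pairwise (· ≤ ·) := by
    rw [List.pairwise_map]
    exact List.pairwise_lt_range.imp (fun {a b} hab => by omega)
  rw [pyRange_two_eq, solveLoopA_none_iff hpw]
  have hmid : (∀ i ∈ (List.range ((nums.length + 1) / 2)).map (fun k => ((2 * k : Nat) : Int)),
        i + 2 < (nums.length : Int) →
        PySem.List.pyGetD nums i 0 = PySem.List.pyGetD nums (i + 2) 0) ↔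
      (∀ k, k + 1 < (nums.length + 1) / 2 →
        nums.getD (2 * k) 0 = nums.getD (2 * (k + 1)) 0) := by
    constructor
    · intro h k hk
      have hmem : ((2 * k : Nat) : Int) ∈ (List.range ((nums.length + 1) / 2)).map
          (fun k => ((2 * k : Nat) : Int)) :=
        List.mem_map.mpr ⟨k, List.mem_range.mpr (by omega), rfl⟩
      have hst := h _ hmem (by omega)
      rw [PySem.List.pyGetD_natCast,
        show ((2 * k : Nat) : Int) + 2 = ((2 * (k + 1) : Nat) : Int) by omega,
        PySem.List.pyGetD_natCast] at hst
      exact hst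
    · intro h i hi hlt
      rcases List.mem_map.mp hi with ⟨k, hk, rfl⟩
      rw [PySem.List.pyGetD_natCast,
        show ((2 * k : Nat) : Int) + 2 = ((2 * (k + 1) : Nat) : Int) by omega,
        PySem.List.pyGetD_natCast]
      exact h k (by omega)
    
  rw [hmid, chain_iff_all_first (fun k => nums.getD (2 * k) 0) ((nums.length + 1) / 2)]
  constructor
  · intro h k hk; simpa using h k (by omega)
  · intro h k hk; simpa using h k (by omega)

-- B's pair-consuming pass only returns "YES" or "NO"
theorem goB_values (first second : Int) :
    ∀ xs, goB first second xs = "YES" ∨ goB first second xs = "NO"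
  | [] => Or.inr rfl
  | [x] => by
    simp only [goB]
    split_ifs <;> simp
  | x :: y :: rest' => by
    simp only [goB]
    split_ifs with h
    · simp
    · exact goB_values first second rest'

-- characterisation of B's pass
theorem goB_yes_iff (first second : Int) :
    ∀ xs, goB first second xs = "YES" ↔
      (xs.length % 2 = 1 ∧ (∀ k, 2 * k < xs.length → xs.getD (2 * k) 0 = first) ∧ second ≠ first)
  | [] => by simp [goB]
  | [x] => by
    simp only [goB]
    split_ifs with h1 h2
    · simp only [String.reduceEq, false_iff, not_and]
      intro _ hall
      have := hall 0 (by simp)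
      simp at this h1
      exact absurd this h1
    · simp only [true_iff]
      refine ⟨by simp, ?_, by simpa using h2⟩
      intro k hk
      have hk0 : k = 0 := by simpa using hk
      subst hk0
      simp at h1 ⊢
      exact h1
    · simp only [String.reduceEq, false_iff, not_and]
      intro _ _ hs
      simp at h2
      exact absurd h2 hs
  | x :: y :: rest' => by
    simp only [goB]
    split_ifs with h1
    · simp only [String.reduceEq, false_iff, not_and]
      intro _ hall
      have := hall 0 (by simp)
      simp at this h1
      exact absurd this h1
    · rw [goB_yes_iff first second rest']
      simp only [List.length_cons]
      constructor
      · rintro ⟨hpar, hall, hs⟩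
        refine ⟨by omega, ?_, hs⟩
        intro k hk
        match k with
        | 0 => simp at h1 ⊢; exact h1
        | (m + 1) =>
          have : rest'.getD (2 * m) 0 = first := hall m (by omega)
          rw [show 2 * (m + 1) = (2 * m) + 1 + 1 by omega, List.getD_cons_succ, List.getD_cons_succ]
          exact this
      · rintro ⟨hpar, hall, hs⟩
        refine ⟨by omega, ?_, hs⟩
        intro m hm
        have := hall (m + 1) (by omega)
        rw [show 2 * (m + 1) = (2 * m) + 1 + 1 by omega, List.getD_cons_succ, List.getD_cons_succ] at this
        exact this

-- A only returns "YES" or "NO"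
theorem solve_values (nums : List Int) : solve nums = "YES" ∨ solve nums = "NO" := by
  unfold solve
  rcases h : solveLoopA nums (nums.length : Int) (PySem.List.pyRange 0 (nums.length : Int) 2) with _ | s
  · simp only [h]; split_ifs <;> simp
  · right; simp only [h]; exact solveLoopA_eq_some h

-- characterisation of A
theorem solve_yes_iff (nums : List Int) :
    solve nums = "YES" ↔
      ((∀ k, 2 * k < nums.length → nums.getD (2 * k) 0 = nums.getD 0 0) ∧
        nums.length % 2 = 1 ∧ nums.getD 1 0 ≠ nums.getD 0 0) := by
  unfold solve
  rcases h : solveLoopA nums (nums.length : Int) (PySem.List.pyRange 0 (nums.length : Int) 2) with _ | s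
  · have hall := (loop_none_iff_evenAll nums).mp h
    have hmod : (PySem.Int.mod ((nums.length : Nat) : Int) 2 == 1) = decide (nums.length % 2 = 1) := by
      have h2 := PySem.Int.mod_eq_emod_of_pos (a := ((nums.length : Nat) : Int)) (b := 2) (by omega)
      simp only [h2]
      by_cases hp : nums.length % 2 = 1 <;> simp [hp] <;> omega
    have h0 : PySem.List.pyGetD nums 0 0 = nums.getD 0 0 := by
      simpa using PySem.List.pyGetD_natCast nums 0 0
    have h1 : PySem.List.pyGetD nums 1 0 = nums.getD 1 0 := by
      simpa using PySem.List.pyGetD_natCast nums 1 0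
    simp only [h, hmod, h0, h1]
    split_ifs with hcond
    · simp only [true_iff]
      simp only [Bool.and_eq_true, decide_eq_true_eq, Bool.not_eq_eq_eq_not,
        Bool.not_true, beq_eq_false_iff_ne, ne_eq] at hcond
      exact ⟨hall, hcond.1, fun he => hcond.2 he.symm⟩
    · simp only [String.reduceEq, false_iff, not_and]
      intro _ hp hne
      exact hcond (by simp [hp]; intro he; exact hne he.symm)
  · simp only [h, solveLoopA_eq_some h]
    simp only [String.reduceEq, false_iff, not_and]
    intro hall
    have := (loop_none_iff_evenAll nums).mpr hall
    rw [h] at this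
    exact absurd this (by simp)

-- B's characterisation lifted to solve_alt
theorem solve_alt_yes_iff (nums : List Int) :
    solve_alt nums = "YES" ↔
      ((∀ k, 2 * k < nums.length → nums.getD (2 * k) 0 = nums.getD 0 0) ∧
        nums.length % 2 = 1 ∧ nums.getD 1 0 ≠ nums.getD 0 0) := by
  match nums with
  | [] => simp [solve_alt]
  | a :: t =>
    unfold solve_alt
    have h0 : PySem.List.pyGetD (a :: t) 0 0 = (a :: t).getD 0 0 := by
      simpa using PySem.List.pyGetD_natCast (a :: t) 0 0
    have h1 : PySem.List.pyGetD (a :: t) 1 0 = (a :: t).getD 1 0 := by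
      exact PySem.List.pyGetD_natCast (a :: t) 1 0
    simp only [h0, h1]
    rw [goB_yes_iff]
    tauto

theorem solve_alt_values (nums : List Int) : solve_alt nums = "YES" ∨ solve_alt nums = "NO" := by
  match nums with
  | [] => right; rfl
  | a :: t => exact goB_values _ _ _

-- ===== VERDICT (by name: the statement is the Claim_ definition above) =====
theorem solve_spec : Claim_equal_solve := by
  intro nums _ _
  unfold Spec_solve
  have hiff := (solve_yes_iff nums).trans (solve_alt_yes_iff nums).symm
  rcases solve_values nums with hA | hA <;> rcases solve_alt_values nums with hB | hB
  · rw [hA, hB]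
  · exact absurd (hB ▸ hiff.mp hA) (by simp)
  · exact absurd (hA ▸ hiff.mpr hB) (by simp)
  · rw [hA, hB]
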